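-- pv_equiv track=rewrite | github.com/it-is-me-mario/MARIO | mario/tools/utilities.py | subplot_grid
-- ===== SOURCE A (Python) =====
-- import math
--
-- def subplot_grid(subplot_number, orientation="v"):
--
--     if orientation == "v":
--         j = 0
--         n_cols = []
--         for i in reversed(range(subplot_number + 1)):
--             if int(math.sqrt(i) + 0.5) ** 2 == i:
--                 n_cols += [int(math.sqrt(i))]
--             j += 1
--         n_cols = n_cols[0]
--
--         if int(math.sqrt(subplot_number) + 0.5) ** 2 == subplot_number:
--             n_rows = n_cols
--         else:
--             n_rows = n_cols + int(math.ceil((subplot_number - n_cols ** 2) / n_cols))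
--
--     elif orientation == "h":
--         j = 0
--         n_rows = []
--         for i in reversed(range(subplot_number + 1)):
--             if int(math.sqrt(i) + 0.5) ** 2 == i:
--                 n_rows += [int(math.sqrt(i))]
--             j += 1
--         n_rows = n_rows[0]
--
--         if int(math.sqrt(subplot_number) + 0.5) ** 2 == subplot_number:
--             n_cols = n_rows
--         else:
--             n_cols = n_rows + int(math.ceil((subplot_number - n_rows ** 2) / n_rows))
--
--     grid = [(row + 1, col + 1) for row in range(n_rows) for col in range(n_cols)]
--
--     return (n_rows, n_cols, grid)
-- ===== SOURCE B (Python) =====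
-- import math
--
-- def subplot_grid(subplot_number, orientation="v"):
--     # closed-form integer root instead of A's O(n) downward scan for a perfect square
--     r = math.isqrt(subplot_number)
--     extra = 0 if r * r == subplot_number else (subplot_number - r * r + r - 1) // r
--     if orientation == "v":
--         n_rows, n_cols = r + extra, r
--     elif orientation == "h":
--         n_rows, n_cols = r, r + extra
--     grid = [(row + 1, col + 1) for row in range(n_rows) for col in range(n_cols)]
--     return (n_rows, n_cols, grid)
-- ===== Notes on version B (the rewrite author's own statement) =====
-- stated objective: faster
-- what changed: A scans every i from subplot_number down to 0 to find the largest perfect square; B computes the integer root directly with math.isqrt and a ceiling division, eliminating the O(n) scan (and the float sqrt).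
import Mathlib
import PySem

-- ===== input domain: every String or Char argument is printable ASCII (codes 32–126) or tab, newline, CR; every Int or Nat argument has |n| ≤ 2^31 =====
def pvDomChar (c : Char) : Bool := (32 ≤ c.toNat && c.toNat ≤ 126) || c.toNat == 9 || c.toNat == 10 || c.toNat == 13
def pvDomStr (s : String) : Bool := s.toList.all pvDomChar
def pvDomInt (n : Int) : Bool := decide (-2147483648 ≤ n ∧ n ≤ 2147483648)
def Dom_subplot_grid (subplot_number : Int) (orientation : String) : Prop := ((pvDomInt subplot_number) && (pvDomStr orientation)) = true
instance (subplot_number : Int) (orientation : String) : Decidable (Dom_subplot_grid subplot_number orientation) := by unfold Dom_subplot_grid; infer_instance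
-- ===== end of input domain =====

-- B replaces A's linear downward scan for the largest perfect square by a direct integer
-- square root plus a ceiling division (objective: faster root computation, same grid).

-- ===== PORT A =====
-- int(math.sqrt(i) + 0.5) ** 2 == i : exact perfect-square test for 0 ≤ i ≤ 2^31 (float sqrt is
-- exact enough there); ported as (Nat.sqrt i.toNat)^2 == i, and int(math.sqrt(i)) as Nat.sqrt i.toNat.
def subplot_grid (subplot_number : Int) (orientation : String) : Int × Int × (List (Int × Int)) :=
  if orientation == "v" then
    let n_cols_list : List Int :=
      ((PySem.List.pyRange 0 (subplot_number + 1) 1).reverse).foldl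
        (fun acc i => if ((Nat.sqrt i.toNat : Int)) ^ 2 == i
                      then acc ++ [((Nat.sqrt i.toNat : Int))] else acc) []
    -- n_cols[0]: IndexError on the empty list (subplot_number < 0) is excluded by Pre_
    let n_cols : Int := (PySem.List.pyGet? n_cols_list 0).getD 0
    let n_rows : Int :=
      if ((Nat.sqrt subplot_number.toNat : Int)) ^ 2 == subplot_number then n_cols
      -- int(math.ceil((n - c^2)/c)) : exact ceiling division on the domain, ported as -((-x) // c)
      else n_cols + (-(PySem.Int.floordiv (-(subplot_number - n_cols ^ 2)) n_cols))
    let grid := (PySem.List.pyRange 0 n_rows 1).flatMap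
      (fun row => (PySem.List.pyRange 0 n_cols 1).map (fun col => (row + 1, col + 1)))
    (n_rows, n_cols, grid)
  else if orientation == "h" then
    let n_rows_list : List Int :=
      ((PySem.List.pyRange 0 (subplot_number + 1) 1).reverse).foldl
        (fun acc i => if ((Nat.sqrt i.toNat : Int)) ^ 2 == i
                      then acc ++ [((Nat.sqrt i.toNat : Int))] else acc) []
    let n_rows : Int := (PySem.List.pyGet? n_rows_list 0).getD 0
    let n_cols : Int :=
      if ((Nat.sqrt subplot_number.toNat : Int)) ^ 2 == subplot_number then n_rows
      else n_rows + (-(PySem.Int.floordiv (-(subplot_number - n_rows ^ 2)) n_rows))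
    let grid := (PySem.List.pyRange 0 n_rows 1).flatMap
      (fun row => (PySem.List.pyRange 0 n_cols 1).map (fun col => (row + 1, col + 1)))
    (n_rows, n_cols, grid)
  else (0, 0, [])  -- Python raises UnboundLocalError here; excluded by Pre_

-- ===== PORT B =====
def subplot_grid_alt (subplot_number : Int) (orientation : String) : Int × Int × (List (Int × Int)) :=
  -- math.isqrt : exact integer root for subplot_number ≥ 0 (negatives, where it raises, excluded by Pre_)
  let r : Int := (Nat.sqrt subplot_number.toNat : Int)
  let extra : Int :=
    if r * r == subplot_number then 0
    else PySem.Int.floordiv (subplot_number - r * r + r - 1) r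
  let nrc : Int × Int := if orientation == "v" then (r + extra, r) else (r, r + extra)
  -- the elif "h" branch; other orientations raise UnboundLocalError in Python, excluded by Pre_
  let n_rows := nrc.1
  let n_cols := nrc.2
  let grid := (PySem.List.pyRange 0 n_rows 1).flatMap
    (fun row => (PySem.List.pyRange 0 n_cols 1).map (fun col => (row + 1, col + 1)))
  (n_rows, n_cols, grid)

-- ===== PRECONDITION & SPEC =====
-- Pre_ excludes exactly the inputs where A raises: subplot_number < 0 (IndexError on the empty
-- collected list) and orientations other than "v"/"h" (UnboundLocalError).
def Pre_subplot_grid (subplot_number : Int) (orientation : String) : Prop :=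
  0 ≤ subplot_number ∧ (orientation = "v" ∨ orientation = "h")
instance (subplot_number : Int) (orientation : String) : Decidable (Pre_subplot_grid subplot_number orientation) := by unfold Pre_subplot_grid; infer_instance
def pvWitness_subplot_grid : Int × String := (7, "v")

def Spec_subplot_grid (subplot_number : Int) (orientation : String) (out : Int × Int × (List (Int × Int))) : Prop := out = subplot_grid_alt subplot_number orientation
instance (subplot_number : Int) (orientation : String) (out : Int × Int × (List (Int × Int))) : Decidable (Spec_subplot_grid subplot_number orientation out) := by unfold Spec_subplot_grid; infer_instance

-- ===== CLAIM (what is proved, stated in full; the proofs are below) =====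
def Claim_equal_subplot_grid : Prop := ∀ (subplot_number : Int) (orientation : String), Dom_subplot_grid subplot_number orientation → Pre_subplot_grid subplot_number orientation → Spec_subplot_grid subplot_number orientation (subplot_grid subplot_number orientation)

-- ===== LEMMAS AND PROOFS =====

-- Nat.sqrt is unchanged by a non-square successor
lemma sqrt_succ_of_not_sq (m : Nat) (h : ¬ Nat.sqrt (m+1) * Nat.sqrt (m+1) = m+1) :
    Nat.sqrt (m+1) = Nat.sqrt m := by
  have h1 : Nat.sqrt (m+1) ^ 2 ≤ m + 1 := Nat.sqrt_le' (m+1)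
  have h2 : Nat.sqrt m ≤ Nat.sqrt (m+1) := Nat.sqrt_le_sqrt (by omega)
  have h3 : Nat.sqrt (m+1) ^ 2 ≤ m := by
    rcases Nat.lt_or_ge (Nat.sqrt (m+1) ^ 2) (m+1) with hlt | hge
    · omega
    · exfalso; apply h
      have : Nat.sqrt (m+1) ^ 2 = m + 1 := by omega
      simpa [pow_two] using this
  have h4 : Nat.sqrt (m+1) ≤ Nat.sqrt m := Nat.le_sqrt'.mpr h3
  omega

-- scanning m, m-1, …, 0, the root of the first perfect square found is Nat.sqrt m
lemma nat_first_square (m : Nat) :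
    (((List.range (m+1)).reverse.filter (fun k => Nat.sqrt k * Nat.sqrt k == k)).map
      (fun k => Nat.sqrt k)).head? = some (Nat.sqrt m) := by
  induction m with
  | zero => decide
  | succ m ih =>
    rw [List.range_succ, List.reverse_append]
    by_cases h : Nat.sqrt (m+1) * Nat.sqrt (m+1) = m+1
    · simp [h]
    · rw [sqrt_succ_of_not_sq m h]
      simpa [h] using ih

-- ceiling division: -((-a) // r) = (a + r - 1) // r for 0 < r
lemma ceil_div_eq (a r : Int) (hr : 0 < r) :
    -(PySem.Int.floordiv (-a) r) = PySem.Int.floordiv (a + r - 1) r := by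
  rw [PySem.Int.neg_floordiv_neg_eq_iff_of_pos hr]
  have := (PySem.Int.floordiv_eq_iff_of_pos hr (a := a + r - 1)
    (q := PySem.Int.floordiv (a + r - 1) r)).mp rfl
  constructor <;> nlinarith [this.1, this.2]

-- A's collected-squares head equals the direct integer root
lemma ncols_eq (n : Int) (hn : 0 ≤ n) :
    (PySem.List.pyGet? (((PySem.List.pyRange 0 (n + 1) 1).reverse).foldl
      (fun acc i => if ((Nat.sqrt i.toNat : Int)) ^ 2 == i
                    then acc ++ [((Nat.sqrt i.toNat : Int))] else acc) []) 0).getD 0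
    = (Nat.sqrt n.toNat : Int) := by
  rw [PySem.List.foldl_append_if, PySem.List.pyRange_one]
  have hm : (n + 1 - 0).toNat = n.toNat + 1 := by omega
  rw [hm, ← List.map_reverse, List.filter_map, List.map_map]
  have hp : ((fun i : Int => ((Nat.sqrt i.toNat : Int)) ^ 2 == i) ∘ (fun k : Nat => (0:Int) + k))
      = (fun k : Nat => Nat.sqrt k * Nat.sqrt k == k) := by
    funext k
    simp only [Function.comp_apply, zero_add, Int.toNat_natCast, pow_two, ← Nat.cast_mul]
    by_cases h : Nat.sqrt k * Nat.sqrt k = k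
    · simp [h]
    · have h1 : ((↑(Nat.sqrt k * Nat.sqrt k):Int) == (↑k:Int)) = false := by
        simp only [beq_eq_false_iff_ne, ne_eq, Nat.cast_inj]; exact h
      have h2 : ((Nat.sqrt k * Nat.sqrt k) == k) = false := by simp [h]
      rw [h1, h2]
  have hg : ((fun i : Int => ((Nat.sqrt i.toNat : Int))) ∘ (fun k : Nat => (0:Int) + k))
      = (fun k : Nat => ((Nat.sqrt k : Int))) := by
    funext k; simp
  rw [hp, hg]
  have : (fun k : Nat => ((Nat.sqrt k : Int))) = (fun x : Nat => (x : Int)) ∘ (fun k => Nat.sqrt k) := rfl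
  rw [this, ← List.map_map]
  have hhead := nat_first_square n.toNat
  cases hL : (((List.range (n.toNat+1)).reverse.filter (fun k => Nat.sqrt k * Nat.sqrt k == k)).map
      (fun k => Nat.sqrt k)) with
  | nil => rw [hL] at hhead; simp at hhead
  | cons a t =>
    rw [hL] at hhead
    simp only [List.head?_cons, Option.some.injEq] at hhead
    subst hhead
    simp [PySem.List.pyGet?, PySem.List.pyIdx?]

-- A's row count (root + float ceiling) equals B's root + integer ceiling division
lemma nrows_eq (n : Int) (hn : 0 ≤ n) :
    (if ((Nat.sqrt n.toNat : Int)) ^ 2 == n then (Nat.sqrt n.toNat : Int)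
     else (Nat.sqrt n.toNat : Int) +
       (-(PySem.Int.floordiv (-(n - (Nat.sqrt n.toNat : Int) ^ 2)) (Nat.sqrt n.toNat : Int))))
    = (Nat.sqrt n.toNat : Int) +
      (if (Nat.sqrt n.toNat : Int) * (Nat.sqrt n.toNat : Int) == n then 0
       else PySem.Int.floordiv (n - (Nat.sqrt n.toNat : Int) * (Nat.sqrt n.toNat : Int)
         + (Nat.sqrt n.toNat : Int) - 1) (Nat.sqrt n.toNat : Int)) := by
  set r : Int := (Nat.sqrt n.toNat : Int) with hr
  rw [pow_two]
  by_cases h : r * r = n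
  · simp [h]
  · have hb : (r * r == n) = false := by simp [h]
    rw [hb]
    simp only [Bool.false_eq_true, if_false]
    have hrpos : 0 < r := by
      have hne : n ≠ 0 := by
        intro h0; apply h; subst h0; simp [hr]
      have h1 : 1 ≤ n.toNat := by omega
      have := Nat.sqrt_pos.mpr h1
      omega
    rw [ceil_div_eq (n - r * r) r hrpos]


-- ===== VERDICT (by name: the statement is the Claim_ definition above) =====
theorem subplot_grid_spec : Claim_equal_subplot_grid := by
  intro n o hdom hpre
  obtain ⟨hn, ho⟩ := hpre
  unfold Spec_subplot_grid
  rcases ho with rfl | rfl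
  · simp only [subplot_grid, subplot_grid_alt, String.reduceBEq, reduceIte]
    rw [ncols_eq n hn, nrows_eq n hn]
  · simp only [subplot_grid, subplot_grid_alt, String.reduceBEq, reduceIte]
    rw [ncols_eq n hn, nrows_eq n hn]
    simp
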